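-- pv_equiv track=rewrite | github.com/Bergjak/Leetcode-solutions | [Hard] 1938. Maximum Genetic Difference Query.py | maxGeneticDifference
-- ===== SOURCE A (Python) =====
-- from typing import List
--
-- from collections import defaultdict
--
-- def maxGeneticDifference(parents: List[int], queries: List[List[int]]) -> List[int]:
--     def insert(trie, val):
--         cur = trie
--         bitmask = bin(val)[2:].zfill(20)
--         first_new_branch_idx = None
--         for idx, bit in enumerate(bitmask):
--             if bit not in cur:
--                 cur[bit] = {}
--                 if first_new_branch_idx is None:
--                     first_new_branch_idx = idx
--             cur = cur[bit]
--         return first_new_branch_idx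
--
--     def remove(trie, val, remove_idx):
--         cur = trie
--         bitmask = bin(val)[2:].zfill(20)
--         for idx, bit in enumerate(bitmask):
--             if idx == remove_idx:
--                 del cur[bit]
--                 break
--             cur = cur[bit]
--
--     def maxXor(trie, val):
--         cur = trie
--         bitmask = bin(val)[2:].zfill(20)
--         result = ''
--
--         for bit in bitmask:
--             if bit == '1':
--                 if '0' in cur:
--                     cur = cur['0']
--                     result += '1'  # 1 ^ 0 == 1
--                 else:
--                     cur = cur['1']
--                     result += '0'  # 1 ^ 1 == 0
--             else:
--                 if '1' in cur:
--                     cur = cur['1']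
--                     result += '1'  # 0 ^ 1 == 1
--                 else:
--                     cur = cur['0']
--                     result += '0'  # 0 ^ 0 == 0
--         return int(result, 2)
--
--     newQueries = defaultdict(list)  # genetic val: [(val, idx_in_quries)]
--     res = [0] * len(queries)
--     for idx, (node, val) in enumerate(queries):
--         newQueries[node].append((val, idx))
--         # So, in the DFS, each time I arrive at a node, I need to ask what queries are at this node
--
--     graph = defaultdict(list)
--     start_idx = None
--     for child, parent in enumerate(parents):
--         if parent == -1:
--             start_idx = child
--         graph[parent].append(child)
--
--     def dfs(node, ogTrie):
--         for val, idx in newQueries[node]: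
--             res[idx] = maxXor(ogTrie, val)
--
--         for child in graph[node]:
--             remove_idx = insert(ogTrie, child)
--             dfs(child, ogTrie)
--             # The remove operation would just have to delete from the trie the first new branch that
--             # is added, if any at all
--             if remove_idx is not None:
--                 remove(ogTrie, child, remove_idx)
--
--     TRIE = {}
--     insert(TRIE, start_idx)
--     dfs(start_idx, TRIE)
--
--     return res
-- ===== SOURCE B (Python) =====
-- from typing import List
--
-- def maxGeneticDifference(parents: List[int], queries: List[List[int]]) -> List[int]:
--     # No trie at all: keep the current root-to-node path as an explicit list and
--     # answer each query by a linear max-scan of val ^ ancestor over that path.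
--     byNode = {}
--     for i, (node, val) in enumerate(queries):
--         byNode.setdefault(node, []).append((val, i))
--
--     kids = {}
--     for c, p in enumerate(parents):
--         kids.setdefault(p, []).append(c)
--
--     root = next(i for i in range(len(parents) - 1, -1, -1) if parents[i] == -1)
--
--     ans = [0] * len(queries)
--     path = []
--
--     def dfs(u):
--         path.append(u)
--         for val, i in byNode.get(u, []):
--             ans[i] = max(val ^ a for a in path)
--         for c in kids.get(u, []):
--             dfs(c)
--         path.pop()
--
--     dfs(root)
--     return ans
-- ===== Notes on version B (the rewrite author's own statement) =====
-- stated objective: simpler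
-- what changed: The XOR trie is eliminated entirely: instead of maintaining a 20-bit bitmask trie with insert-before/remove-after and a greedy bit walk per query, B keeps the current root-to-node path as a plain list during the DFS and answers each query by a linear max-scan of val ^ ancestor over that path.
-- outside the precondition, e.g. on maxGeneticDifference([-1], [[0, -3]]): A returns [3], B returns [-3]; on maxGeneticDifference([-1], [[0, 1048576]]): A raises KeyError, B returns [1048576]
import Mathlib
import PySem

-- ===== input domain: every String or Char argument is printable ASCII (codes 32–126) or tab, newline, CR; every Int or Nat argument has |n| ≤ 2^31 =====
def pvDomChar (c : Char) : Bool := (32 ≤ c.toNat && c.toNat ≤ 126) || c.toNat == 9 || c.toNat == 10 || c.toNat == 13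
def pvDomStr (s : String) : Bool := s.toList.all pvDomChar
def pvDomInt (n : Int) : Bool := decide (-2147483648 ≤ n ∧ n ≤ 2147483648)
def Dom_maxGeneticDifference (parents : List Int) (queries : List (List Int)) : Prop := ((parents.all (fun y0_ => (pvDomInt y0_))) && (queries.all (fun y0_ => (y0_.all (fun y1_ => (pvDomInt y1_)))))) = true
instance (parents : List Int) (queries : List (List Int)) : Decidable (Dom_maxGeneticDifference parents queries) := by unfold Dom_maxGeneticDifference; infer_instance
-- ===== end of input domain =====

-- B eliminates A's XOR trie altogether: the DFS keeps the current root-to-node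
-- path as a plain list and answers each query by a linear max-scan of
-- val ^ ancestor over that path (objective: simpler).

-- ===== PORT A =====

-- bin(v)[2:].zfill(20) as a list of bits, exact for v ≥ 0 (Pre_ admits only such values)
def pyBits (v : Int) : List Bool :=
  let n := v.toNat
  let w := max 20 (Nat.log2 n + 1)
  (List.range w).map (fun i => n.testBit (w - 1 - i))

-- the nested dicts of A: each dict has at most keys '0','1'; an absent key is `nil`
inductive TrieA : Type
  | nil : TrieA
  | nd : TrieA → TrieA → TrieA
deriving DecidableEq, Repr

def TrieA.child : TrieA → Bool → TrieA
  | .nil, _ => .nil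
  | .nd c0 c1, b => if b then c1 else c0

def TrieA.setChild : TrieA → Bool → TrieA → TrieA
  | .nil, _, _ => .nil
  | .nd c0 c1, b, c => if b then .nd c0 c else .nd c c1

-- the chain of fresh {} dicts created by insert once a bit is missing
def chainA : List Bool → TrieA
  | [] => .nd .nil .nil
  | b :: bs => (TrieA.nd .nil .nil).setChild b (chainA bs)

-- insert(trie, val): returns (new trie, first_new_branch_idx)
def insA : TrieA → List Bool → TrieA × Option Nat
  | t, [] => (t, none)
  | .nil, _ :: _ => (.nil, none)   -- unreachable: cur is always a dict
  | .nd c0 c1, b :: bs =>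
    let c := (TrieA.nd c0 c1).child b
    if c = .nil then
      ((TrieA.nd c0 c1).setChild b (chainA bs), some 0)
    else
      let r := insA c bs
      ((TrieA.nd c0 c1).setChild b r.1, r.2.map (· + 1))

-- remove(trie, val, remove_idx)
def remA : TrieA → List Bool → Nat → TrieA
  | .nil, _, _ => .nil
  | t, [], _ => t
  | .nd c0 c1, b :: _, 0 => (TrieA.nd c0 c1).setChild b .nil       -- del cur[bit]; break
  | .nd c0 c1, b :: bs, (k+1) => (TrieA.nd c0 c1).setChild b (remA ((TrieA.nd c0 c1).child b) bs k)

-- maxXor(trie, val); result string built bit by bit = int(result, 2) accumulator.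
-- On a missing key Python raises KeyError (excluded by Pre_); here the walk continues on `nil`.
def mxA : TrieA → List Bool → Int → Int
  | _, [], acc => acc
  | cur, b :: bs, acc =>
    if b then
      if cur.child false ≠ .nil then mxA (cur.child false) bs (2*acc+1)
      else mxA (cur.child true) bs (2*acc)
    else
      if cur.child true ≠ .nil then mxA (cur.child true) bs (2*acc+1)
      else mxA (cur.child false) bs (2*acc)

-- newQueries = defaultdict(list); for idx,(node,val) in enumerate(queries): newQueries[node].append((val,idx))
def nqA (queries : List (List Int)) : PySem.Dict Int (List (Int × Int)) :=
  (PySem.List.enumerate queries 0).foldl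
    (fun d p => d.insert (p.2.headD 0) (d.getD (p.2.headD 0) [] ++ [(p.2.getD 1 0, p.1)]))
    PySem.Dict.empty

-- graph = defaultdict(list); start_idx = None; one loop sets start (last -1) and appends children
def graphStartA (parents : List Int) : PySem.Dict Int (List Int) × Option Int :=
  (PySem.List.enumerate parents 0).foldl
    (fun acc p =>
      ((acc.1.insert p.2 (acc.1.getD p.2 [] ++ [p.1])),
       if p.2 = -1 then some p.1 else acc.2))
    (PySem.Dict.empty, none)

-- dfs(node, ogTrie); fuel (parents.length + 1) bounds the recursion depth, which
-- Python's dfs reaches without it (each node has one parent, so paths are acyclic)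
def dfsA (nq : PySem.Dict Int (List (Int × Int))) (g : PySem.Dict Int (List Int)) :
    Nat → Int → TrieA → List Int → TrieA × List Int
  | 0, _, t, res => (t, res)
  | f+1, node, t, res =>
    let res1 := (nq.getD node []).foldl
      (fun r vi => r.set vi.2.toNat (mxA t (pyBits vi.1) 0)) res
    (g.getD node []).foldl
      (fun acc c =>
        let ti := insA acc.1 (pyBits c)
        let td := dfsA nq g f c ti.1 acc.2
        match ti.2 with
        | some k => (remA td.1 (pyBits c) k, td.2)
        | none => td)
      (t, res1)

def maxGeneticDifference (parents : List Int) (queries : List (List Int)) : List Int :=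
  let nq := nqA queries
  let res0 := List.replicate queries.length (0 : Int)
  let gs := graphStartA parents
  match gs.2 with
  | none => res0    -- Python raises TypeError here (no -1 in parents); excluded by Pre_
  | some s =>
    let t0 := (insA (TrieA.nd .nil .nil) (pyBits s)).1
    (dfsA nq gs.1 (parents.length + 1) s t0 res0).2

-- ===== PORT B =====

-- byNode.setdefault(node, []).append((val, i))
def byNodeB : List (List Int) → Int → PySem.Dict Int (List (Int × Int)) → PySem.Dict Int (List (Int × Int))
  | [], _, d => d
  | q :: qs, i, d =>
    byNodeB qs (i+1) (d.insert (q.headD 0) (d.getD (q.headD 0) [] ++ [(q.getD 1 0, i)]))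

-- kids.setdefault(p, []).append(c)
def childrenB : List Int → Int → PySem.Dict Int (List Int) → PySem.Dict Int (List Int)
  | [], _, d => d
  | p :: ps, c, d => childrenB ps (c+1) (d.insert p (d.getD p [] ++ [c]))

-- next(i for i in range(len(parents)-1, -1, -1) if parents[i] == -1): first hit scanning from the right
def rootB (parents : List Int) : Option Int :=
  ((PySem.List.enumerate parents 0).reverse.find? (fun p => p.2 == -1)).map (·.1)

-- ans[i] = max(val ^ a for a in path); the path is nonempty whenever B evaluates
-- this (it contains the current node), so the .getD 0 default is unreachable
def scanMax (path : List Int) (v : Int) : Int :=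
  (PySem.List.max? (path.map (fun a => PySem.Int.bxor v a)) (fun x => x)).getD 0

-- dfs(u): path.append(u); answer queries by scanning path; recurse; path.pop()
def dfsB (nq : PySem.Dict Int (List (Int × Int))) (g : PySem.Dict Int (List Int)) :
    Nat → Int → List Int → List Int → List Int
  | 0, _, _, ans => ans
  | f+1, u, path, ans =>
    let path1 := path ++ [u]
    let ans1 := (nq.getD u []).foldl
      (fun r vi => r.set vi.2.toNat (scanMax path1 vi.1)) ans
    (g.getD u []).foldl (fun a c => dfsB nq g f c path1 a) ans1

def maxGeneticDifference_alt (parents : List Int) (queries : List (List Int)) : List Int :=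
  let nq := byNodeB queries 0 PySem.Dict.empty
  let g := childrenB parents 0 PySem.Dict.empty
  match rootB parents with
  | none => List.replicate queries.length (0 : Int)   -- Python raises StopIteration; excluded by Pre_
  | some r => dfsB nq g (parents.length + 1) r [] (List.replicate queries.length (0 : Int))

-- ===== PRECONDITION & SPEC =====

-- Pre_ excludes exactly the inputs where Python A raises (no -1 in parents → TypeError;
-- a query not of arity 2 → ValueError; a genetic value ≥ 2^20 at a node A's DFS can reach
-- → KeyError past the 20-bit trie) and, as a natural-domain restriction, negative genetic
-- values at reachable nodes and more than 2^20 nodes, where A's answers are artefacts of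
-- forcing values into its fixed 20-bit bitmask (negative values are walked via the
-- characters of bin(val), node indices ≥ 2^20 get 21-bit paths misaligned with 20-bit
-- queries); a query whose node is outside range(len(parents)) is never visited, so its
-- value is unconstrained.
def Pre_maxGeneticDifference (parents : List Int) (queries : List (List Int)) : Prop :=
  (-1 : Int) ∈ parents ∧ parents.length ≤ 1048576 ∧
  ∀ q ∈ queries, q.length = 2 ∧
    (q.headD 0 < 0 ∨ (parents.length : Int) ≤ q.headD 0 ∨
      (0 ≤ q.getD 1 0 ∧ q.getD 1 0 < 1048576))

instance (parents : List Int) (queries : List (List Int)) : Decidable (Pre_maxGeneticDifference parents queries) := by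
  unfold Pre_maxGeneticDifference; infer_instance

def pvWitness_maxGeneticDifference : List Int × List (List Int) := ([-1, 0], [[1, 7], [0, 0]])

def Spec_maxGeneticDifference (parents : List Int) (queries : List (List Int)) (out : List Int) : Prop := out = maxGeneticDifference_alt parents queries
instance (parents : List Int) (queries : List (List Int)) (out : List Int) : Decidable (Spec_maxGeneticDifference parents queries out) := by unfold Spec_maxGeneticDifference; infer_instance

-- ===== CLAIM (what is proved, stated in full; the proofs are below) =====
def Claim_equal_maxGeneticDifference : Prop := ∀ (parents : List Int) (queries : List (List Int)), Dom_maxGeneticDifference parents queries → Pre_maxGeneticDifference parents queries → Spec_maxGeneticDifference parents queries (maxGeneticDifference parents queries)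

-- ===== LEMMAS AND PROOFS =====

-- --- trie abstraction (A side) ---

def subA : TrieA → List Bool → TrieA
  | t, [] => t
  | t, b :: bs => subA (t.child b) bs

-- TInv t P: t is exactly the trie holding the bit paths of the values in P
def TInv (t : TrieA) (P : List Int) : Prop :=
  t ≠ .nil ∧ ∀ s : List Bool, s ≠ [] → (subA t s ≠ .nil ↔ ∃ a ∈ P, s <+: pyBits a)

theorem subA_nil (s : List Bool) : subA .nil s = .nil := by
  induction s with
  | nil => rfl
  | cons b bs ih => simpa [subA, TrieA.child] using ih

theorem subA_snoc (t : TrieA) (s : List Bool) (b : Bool) :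
    subA t (s ++ [b]) = (subA t s).child b := by
  induction s generalizing t with
  | nil => rfl
  | cons c cs ih => simp [subA, ih]

theorem setChild_child_self (c0 c1 : TrieA) (b : Bool) :
    (TrieA.nd c0 c1).setChild b ((TrieA.nd c0 c1).child b) = TrieA.nd c0 c1 := by
  cases b <;> simp [TrieA.setChild, TrieA.child]

theorem child_setChild (c0 c1 : TrieA) (b b' : Bool) (x : TrieA) :
    ((TrieA.nd c0 c1).setChild b x).child b' = if b' = b then x else (TrieA.nd c0 c1).child b' := by
  cases b <;> cases b' <;> simp [TrieA.setChild, TrieA.child]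

theorem setChild_ne_nil (c0 c1 : TrieA) (b : Bool) (x : TrieA) :
    (TrieA.nd c0 c1).setChild b x ≠ .nil := by
  cases b <;> simp [TrieA.setChild]

theorem setChild_nil_of_child_nil (c0 c1 : TrieA) (b : Bool)
    (h : (TrieA.nd c0 c1).child b = .nil) : (TrieA.nd c0 c1).setChild b .nil = TrieA.nd c0 c1 := by
  cases b <;> simp [TrieA.child] at h <;> simp [TrieA.setChild, h]

theorem remA_setChild_zero (c0 c1 : TrieA) (b : Bool) (x : TrieA) (bs : List Bool) :
    remA ((TrieA.nd c0 c1).setChild b x) (b :: bs) 0 = (TrieA.nd c0 c1).setChild b .nil := by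
  cases b <;> simp [TrieA.setChild, remA]

theorem remA_setChild_succ (c0 c1 : TrieA) (b : Bool) (x : TrieA) (bs : List Bool) (k : Nat) :
    remA ((TrieA.nd c0 c1).setChild b x) (b :: bs) (k+1) = (TrieA.nd c0 c1).setChild b (remA x bs k) := by
  cases b <;> simp [TrieA.setChild, remA, TrieA.child]

theorem sub_chain (bs s : List Bool) : subA (chainA bs) s ≠ .nil ↔ s <+: bs := by
  induction bs generalizing s with
  | nil =>
    cases s with
    | nil => simp [subA, chainA]
    | cons b bs' =>
      simp [chainA, subA, TrieA.child]
      cases b <;> simp [subA_nil]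
  | cons b bs ih =>
    cases s with
    | nil => simp [subA, chainA, TrieA.setChild]; cases b <;> simp
    | cons c cs =>
      simp only [chainA, subA]
      cases b <;> cases c <;>
        simp [TrieA.setChild, TrieA.child, subA_nil, ih, List.cons_prefix_cons]

theorem ins_ne_nil (t : TrieA) (bits : List Bool) (h : t ≠ .nil) : (insA t bits).1 ≠ .nil := by
  cases t with
  | nil => exact absurd rfl h
  | nd c0 c1 =>
    cases bits with
    | nil => simp [insA]
    | cons b bs =>
      simp only [insA]
      split <;> cases b <;> simp [TrieA.setChild]

theorem ins_sub (bits : List Bool) (t : TrieA) (s : List Bool) (h : t ≠ .nil) :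
    subA (insA t bits).1 s ≠ .nil ↔ (subA t s ≠ .nil ∨ s <+: bits) := by
  induction bits generalizing t s with
  | nil =>
    cases t with
    | nil => exact absurd rfl h
    | nd c0 c1 =>
      simp only [insA, List.prefix_nil]
      constructor
      · exact Or.inl
      · rintro (hs | rfl)
        · exact hs
        · simp [subA]
  | cons b bs ih =>
    cases t with
    | nil => exact absurd rfl h
    | nd c0 c1 =>
      simp only [insA]
      by_cases hc : (TrieA.nd c0 c1).child b = TrieA.nil
      · rw [if_pos hc]
        cases s with
        | nil => simp [subA, setChild_ne_nil]
        | cons b' s' =>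
          simp only [subA, child_setChild]
          by_cases hb : b' = b
          · subst hb
            rw [if_pos rfl, hc]
            simp [sub_chain, subA_nil, List.cons_prefix_cons]
          · rw [if_neg hb]
            simp [List.cons_prefix_cons, hb]
      · rw [if_neg hc]
        cases s with
        | nil => simp [subA, setChild_ne_nil]
        | cons b' s' =>
          simp only [subA, child_setChild]
          by_cases hb : b' = b
          · subst hb
            rw [if_pos rfl]
            simp [ih _ _ hc, List.cons_prefix_cons]
          · rw [if_neg hb]
            simp [List.cons_prefix_cons, hb]

theorem ins_idx_none (bits : List Bool) (t : TrieA) (h : (insA t bits).2 = none) :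
    (insA t bits).1 = t := by
  induction bits generalizing t with
  | nil => rfl
  | cons b bs ih =>
    cases t with
    | nil => rfl
    | nd c0 c1 =>
      simp only [insA] at h ⊢
      by_cases hc : (TrieA.nd c0 c1).child b = TrieA.nil
      · rw [if_pos hc] at h; simp at h
      · rw [if_neg hc] at h ⊢
        simp only [Option.map_eq_none_iff] at h
        rw [show (insA ((TrieA.nd c0 c1).child b) bs).1 = (TrieA.nd c0 c1).child b from ih _ h]
        exact setChild_child_self c0 c1 b

theorem rem_ins (bits : List Bool) (t : TrieA) (k : Nat) (h : (insA t bits).2 = some k) :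
    remA (insA t bits).1 bits k = t := by
  induction bits generalizing t k with
  | nil =>
    cases t <;> simp [insA] at h
  | cons b bs ih =>
    cases t with
    | nil => simp [insA] at h
    | nd c0 c1 =>
      simp only [insA] at h ⊢
      by_cases hc : (TrieA.nd c0 c1).child b = TrieA.nil
      · rw [if_pos hc] at h ⊢
        simp only [Option.some.injEq] at h
        subst h
        rw [remA_setChild_zero, setChild_nil_of_child_nil _ _ _ hc]
      · rw [if_neg hc] at h ⊢
        cases hr : (insA ((TrieA.nd c0 c1).child b) bs).2 with
        | none => rw [hr] at h; simp at h
        | some k0 =>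
          rw [hr] at h
          simp only [Option.map_some, Option.some.injEq] at h
          subst h
          rw [remA_setChild_succ, ih _ _ hr, setChild_child_self]

theorem mxA_cons (cur : TrieA) (b : Bool) (bs : List Bool) (acc : Int) :
    mxA cur (b :: bs) acc
      = if cur.child (!b) ≠ .nil then mxA (cur.child (!b)) bs (2*acc+1)
        else mxA (cur.child b) bs (2*acc) := by
  cases b <;> simp [mxA]

-- --- bit values and xor ---

def bitv (b : Bool) : Int := if b then 1 else 0

def xorBits (q l : List Bool) : Int :=
  (q.zip l).foldl (fun acc p => 2*acc + bitv (p.1 != p.2)) 0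

theorem xb_shift (ps : List (Bool × Bool)) :
    ∀ acc : Int, ps.foldl (fun a p => 2*a + bitv (p.1 != p.2)) acc
      = acc * 2^ps.length + ps.foldl (fun a p => 2*a + bitv (p.1 != p.2)) 0 := by
  induction ps with
  | nil => intro acc; simp
  | cons p ps ih =>
    intro acc
    simp only [List.foldl_cons, List.length_cons]
    rw [ih (2*acc + bitv (p.1 != p.2)), ih (2*0 + bitv (p.1 != p.2))]
    ring

theorem xb_bounds (ps : List (Bool × Bool)) :
    0 ≤ ps.foldl (fun a p => 2*a + bitv (p.1 != p.2)) 0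
      ∧ ps.foldl (fun a p => 2*a + bitv (p.1 != p.2)) 0 < 2^ps.length := by
  induction ps with
  | nil => simp
  | cons p ps ih =>
    simp only [List.foldl_cons, List.length_cons]
    rw [xb_shift]
    have h2 : (0:Int) < 2^ps.length := by positivity
    constructor
    · have : (0:Int) ≤ bitv (p.1 != p.2) := by unfold bitv; split <;> norm_num
      nlinarith [ih.1]
    · have : bitv (p.1 != p.2) ≤ 1 := by unfold bitv; split <;> norm_num
      calc (2*0 + bitv (p.1 != p.2)) * 2^ps.length + ps.foldl _ 0
          ≤ 1 * 2^ps.length + ps.foldl (fun a p => 2*a + bitv (p.1 != p.2)) 0 := by nlinarith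
        _ < 2^(ps.length+1) := by rw [pow_succ]; nlinarith [ih.2]

theorem xorBits_nonneg (q l : List Bool) : 0 ≤ xorBits q l := (xb_bounds _).1

theorem xorBits_lt (q l : List Bool) (h : l.length = q.length) :
    xorBits q l < 2^q.length := by
  have := (xb_bounds (q.zip l)).2
  rwa [List.length_zip, h, min_self] at this

theorem xorBits_cons (b c : Bool) (bs cs : List Bool) (h : cs.length = bs.length) :
    xorBits (b :: bs) (c :: cs) = bitv (b != c) * 2^bs.length + xorBits bs cs := by
  unfold xorBits
  simp only [List.zip_cons_cons, List.foldl_cons]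
  rw [xb_shift]
  rw [List.length_zip, h, min_self]
  ring

-- --- first extremal element of B's max() ---

def Mx (l : List Int) : Int := (PySem.List.max? l (fun x => x)).getD 0

theorem Mx_spec (l : List Int) (h : l ≠ []) : Mx l ∈ l ∧ ∀ y ∈ l, y ≤ Mx l := by
  unfold Mx
  cases hm : PySem.List.max? l (fun x => x) with
  | none => exact absurd ((PySem.List.max?_eq_none_iff l _).mp hm) h
  | some m =>
    refine ⟨by simpa using PySem.List.max?_mem hm, ?_⟩
    intro y hy
    simpa using PySem.List.max?_isMax hm y hy

-- --- pyBits on the admitted domain ---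

theorem pyBits_eq (a : Int) (h0 : 0 ≤ a) (h1 : a < 1048576) :
    pyBits a = (List.range 20).map (fun i => a.toNat.testBit (20 - 1 - i)) := by
  have hw : max 20 (Nat.log2 a.toNat + 1) = 20 := by
    have h19 : Nat.log2 a.toNat ≤ 19 := by
      by_cases hz : a.toNat = 0
      · simp [hz]
      · have := (Nat.log2_lt hz).mpr (show a.toNat < 2^20 by omega)
        omega
    omega
  simp only [pyBits]
  rw [hw]

theorem pyBits_len (a : Int) (h0 : 0 ≤ a) (h1 : a < 1048576) : (pyBits a).length = 20 := by
  rw [pyBits_eq a h0 h1]; simp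

-- fold of the bits of x, high to low, rebuilds x % 2^w
theorem ofBits : ∀ (w : Nat) (x : Nat),
    ((List.range w).foldl (fun acc i => 2*acc + bitv (x.testBit (w - 1 - i))) (0:Int))
      = ((x % 2^w : Nat) : Int) := by
  intro w
  induction w with
  | zero => intro x; simp
  | succ w ih =>
    intro x
    rw [List.range_succ, List.foldl_append]
    have hcong : (List.range w).foldl (fun acc i => 2*acc + bitv (x.testBit (w + 1 - 1 - i))) (0:Int)
        = (List.range w).foldl (fun acc i => 2*acc + bitv ((x/2).testBit (w - 1 - i))) (0:Int) := by
      apply PySem.List.foldl_congr_mem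
      intro acc i hi
      rw [List.mem_range] at hi
      congr 2
      have h1 : w + 1 - 1 - i = (w - 1 - i) + 1 := by omega
      rw [h1, Nat.testBit_succ]
    rw [hcong, ih (x/2)]
    simp only [List.foldl_cons, List.foldl_nil]
    have hb : bitv (x.testBit (w+1-1-w)) = ((x % 2 : Nat) : Int) := by
      have h0 : w+1-1-w = 0 := by omega
      rw [h0, Nat.testBit_zero]
      unfold bitv
      rcases Nat.mod_two_eq_zero_or_one x with h | h <;> simp [h]
    rw [hb]
    have h1 : x = 2^(w+1) * (x/2/2^w) + (2*(x/2 % 2^w) + x % 2) := by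
      have e1 := Nat.div_add_mod x 2
      have e2 := Nat.div_add_mod (x/2) (2^w)
      rw [pow_succ]
      nlinarith [e1, e2]
    have h2 : 2*(x/2 % 2^w) + x % 2 < 2^(w+1) := by
      have l1 := Nat.mod_lt (x/2) (show 0 < 2^w by positivity)
      have l2 := Nat.mod_lt x (show 0 < 2 by norm_num)
      rw [pow_succ]; omega
    have key : (x % 2^(w+1) : Nat) = 2 * (x/2 % 2^w) + x % 2 := by
      calc x % 2^(w+1) = (2^(w+1) * (x/2/2^w) + (2*(x/2 % 2^w) + x % 2)) % 2^(w+1) := by rw [← h1]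
        _ = (2*(x/2 % 2^w) + x % 2) % 2^(w+1) := by rw [Nat.mul_add_mod]
        _ = 2*(x/2 % 2^w) + x % 2 := Nat.mod_eq_of_lt h2
    rw [key]
    push_cast
    ring

theorem xorBits_eq_bxor (v a : Int) (hv0 : 0 ≤ v) (hv1 : v < 1048576)
    (ha0 : 0 ≤ a) (ha1 : a < 1048576) :
    xorBits (pyBits v) (pyBits a) = PySem.Int.bxor v a := by
  have hvn : v.toNat < 2^20 := by omega
  have han : a.toNat < 2^20 := by omega
  rw [pyBits_eq v hv0 hv1, pyBits_eq a ha0 ha1]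
  unfold xorBits
  rw [List.zip_map', List.foldl_map]
  have hcong : (List.range 20).foldl
      (fun acc i => 2*acc + bitv ((v.toNat.testBit (20-1-i), a.toNat.testBit (20-1-i)).1 != (v.toNat.testBit (20-1-i), a.toNat.testBit (20-1-i)).2)) (0:Int)
      = (List.range 20).foldl (fun acc i => 2*acc + bitv ((v.toNat ^^^ a.toNat).testBit (20-1-i))) (0:Int) := by
    apply PySem.List.foldl_congr_mem
    intro acc i _
    congr 2
    rw [Nat.testBit_xor]
  rw [hcong, ofBits 20 (v.toNat ^^^ a.toNat)]
  rw [Nat.mod_eq_of_lt (Nat.xor_lt_two_pow hvn han), PySem.Int.bxor_of_nonneg hv0 ha0]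

-- --- the greedy walk of A computes the maximum xor over the stored values ---

def cands (L : List (List Bool)) (p : List Bool) : List (List Bool) :=
  L.filter (fun l => p.isPrefixOf l)

theorem mem_cands (L : List (List Bool)) (p l : List Bool) :
    l ∈ cands L p ↔ l ∈ L ∧ p <+: l := by
  simp [cands, List.mem_filter, List.isPrefixOf_iff_prefix]

theorem prefix_snoc_iff (p l : List Bool) (x : Bool) (hp : p <+: l) (hlt : p.length < l.length) :
    (p ++ [x]) <+: l ↔ l[p.length]'hlt = x := by
  have htake : List.take (p.length+1) l = p ++ [l[p.length]'hlt] := by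
    rw [List.take_add_one, List.getElem?_eq_getElem hlt, ← List.prefix_iff_eq_take.mp hp]
    simp
  constructor
  · intro h
    have h1 := List.prefix_iff_eq_take.mp h
    rw [List.length_append, List.length_cons, List.length_nil, zero_add, htake] at h1
    have h2 := List.append_cancel_left h1
    simp at h2
    exact h2.symm
  · intro h
    rw [← h, ← htake]
    exact List.take_prefix _ _

-- splitting a candidate at position p.length
theorem cand_split (L : List (List Bool)) (p : List Bool) (b : Bool) (bs : List Bool)
    (hlen : ∀ l ∈ L, l.length = p.length + (bs.length + 1))
    (l : List Bool) (hl : l ∈ cands L p) :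
    ∃ c : Bool, (p ++ [c]) <+: l ∧
      xorBits (b::bs) (l.drop p.length) = bitv (b != c) * 2^bs.length + xorBits bs (l.drop (p.length+1)) ∧
      (∀ x : Bool, (p ++ [x]) <+: l → x = c) ∧
      (l.drop (p.length+1)).length = bs.length := by
  obtain ⟨hlL, hpl⟩ := (mem_cands L p l).mp hl
  have hlt : p.length < l.length := by have := hlen l hlL; omega
  have hrlen : (l.drop (p.length+1)).length = bs.length := by
    rw [List.length_drop]; have := hlen l hlL; omega
  refine ⟨l[p.length]'hlt, (prefix_snoc_iff _ _ _ hpl hlt).mpr rfl, ?_, ?_, hrlen⟩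
  · rw [← List.getElem_cons_drop hlt, xorBits_cons _ _ _ _ hrlen]
  · intro x hx
    exact ((prefix_snoc_iff _ _ _ hpl hlt).mp hx).symm

theorem greedy (t : TrieA) (L : List (List Bool))
    (hE : ∀ s : List Bool, s ≠ [] → ((subA t s ≠ .nil) ↔ ∃ l ∈ L, s <+: l)) :
    ∀ (q p : List Bool) (acc : Int),
      (∀ l ∈ L, l.length = p.length + q.length) →
      (∃ l ∈ L, p <+: l) →
      mxA (subA t p) q acc
        = acc * 2^q.length + Mx ((cands L p).map (fun l => xorBits q (l.drop p.length))) := by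
  intro q
  induction q with
  | nil =>
    intro p acc hlen hex
    simp only [mxA, List.length_nil, pow_zero, mul_one]
    have hne : (cands L p).map (fun l => xorBits [] (l.drop p.length)) ≠ [] := by
      obtain ⟨l, hl, hpl⟩ := hex
      have hm : l ∈ cands L p := (mem_cands L p l).mpr ⟨hl, hpl⟩
      intro hc
      rw [List.map_eq_nil_iff] at hc
      rw [hc] at hm
      simp at hm
    obtain ⟨hmem, _⟩ := Mx_spec _ hne
    rw [List.mem_map] at hmem
    obtain ⟨l, _, hval⟩ := hmem
    have h0 : xorBits [] (l.drop p.length) = 0 := rfl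
    rw [h0] at hval
    omega
  | cons b bs ih =>
    intro p acc hlen hex
    rw [mxA_cons]
    rw [show (subA t p).child (!b) = subA t (p ++ [!b]) from (subA_snoc t p (!b)).symm]
    rw [show (subA t p).child b = subA t (p ++ [b]) from (subA_snoc t p b).symm]
    have hlen' : ∀ l ∈ L, l.length = p.length + (bs.length + 1) := by
      intro l hl; have := hlen l hl; simpa using this
    have hSne : (cands L p).map (fun l => xorBits (b::bs) (l.drop p.length)) ≠ [] := by
      obtain ⟨l, hl, hpl⟩ := hex
      have hm : l ∈ cands L p := (mem_cands L p l).mpr ⟨hl, hpl⟩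
      intro hc
      rw [List.map_eq_nil_iff] at hc
      rw [hc] at hm
      simp at hm
    by_cases hop : subA t (p ++ [!b]) = .nil
    · -- opposite branch absent: every candidate continues with bit b
      rw [if_neg (by simpa using hop)]
      have hnone : ¬ ∃ l ∈ L, (p ++ [!b]) <+: l := by
        intro hcon
        exact ((hE _ (by simp)).mpr hcon) hop
      have hbext : ∀ l ∈ L, p <+: l → (p ++ [b]) <+: l := by
        intro l hlL hpl
        obtain ⟨c, hcpre, _, _, _⟩ := cand_split L p b bs hlen' l ((mem_cands L p l).mpr ⟨hlL, hpl⟩)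
        have hcb : c = b := by
          by_contra hne2
          have : c = !b := by cases b <;> cases c <;> simp_all
          exact hnone ⟨l, hlL, this ▸ hcpre⟩
        exact hcb ▸ hcpre
      have hex' : ∃ l ∈ L, (p ++ [b]) <+: l := by
        obtain ⟨l, hl, hpl⟩ := hex
        exact ⟨l, hl, hbext l hl hpl⟩
      rw [ih (p ++ [b]) (2*acc) (by intro l hl; rw [hlen l hl]; simp; omega) hex']
      simp only [List.length_append, List.length_cons, List.length_nil, Nat.zero_add]
      have hceq : cands L p = cands L (p ++ [b]) := by
        unfold cands
        apply List.filter_congr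
        intro l hlL
        rw [Bool.eq_iff_iff, List.isPrefixOf_iff_prefix, List.isPrefixOf_iff_prefix]
        exact ⟨hbext l hlL, fun h => (List.prefix_append p [b]).trans h⟩
      have hmapeq : (cands L (p ++ [b])).map (fun l => xorBits bs (l.drop (p.length + 1)))
          = (cands L p).map (fun l => xorBits (b::bs) (l.drop p.length)) := by
        rw [hceq]
        apply List.map_congr_left
        intro l hl
        have hl' : l ∈ cands L p := hceq ▸ hl
        obtain ⟨c, hcpre, hdec, huniq, _⟩ := cand_split L p b bs hlen' l hl'
        have hcb : c = b := (huniq b ((mem_cands L (p ++ [b]) l).mp hl).2).symm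
        rw [hdec, hcb]
        simp [bitv]
      rw [hmapeq]
      simp only [pow_succ]
      ring
    · -- opposite branch present: the greedy bit is 1
      rw [if_pos (by simpa using hop)]
      obtain ⟨l0, hl0, hl0p⟩ := (hE _ (by simp)).mp hop
      rw [ih (p ++ [!b]) (2*acc+1) (by intro l hl; rw [hlen l hl]; simp; omega) ⟨l0, hl0, hl0p⟩]
      simp only [List.length_append, List.length_cons, List.length_nil, Nat.zero_add]
      -- abbreviate the two mapped lists
      set So := (cands L (p ++ [!b])).map (fun l => xorBits bs (l.drop (p.length + 1))) with hSo
      set S := (cands L p).map (fun l => xorBits (b::bs) (l.drop p.length)) with hS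
      have hSone : So ≠ [] := by
        have hm : l0 ∈ cands L (p ++ [!b]) := (mem_cands L _ l0).mpr ⟨hl0, hl0p⟩
        intro hc
        rw [hSo, List.map_eq_nil_iff] at hc
        rw [hc] at hm
        simp at hm
      obtain ⟨hmemO, hmaxO⟩ := Mx_spec So hSone
      obtain ⟨hmemS, hmaxS⟩ := Mx_spec S hSne
      have hO0 : 0 ≤ Mx So := by
        rw [hSo] at hmemO
        rw [List.mem_map] at hmemO
        obtain ⟨l, _, hval⟩ := hmemO
        rw [← hval]
        exact xorBits_nonneg _ _
      -- every value in S is at most 2^|bs| + Mx So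
      have hub : ∀ x ∈ S, x ≤ 2^bs.length + Mx So := by
        intro x hx
        rw [hS, List.mem_map] at hx
        obtain ⟨l, hlc, rfl⟩ := hx
        obtain ⟨c, hcpre, hdec, huniq, hrlen⟩ := cand_split L p b bs hlen' l hlc
        rw [hdec]
        by_cases hcb : c = b
        · have hltx := xorBits_lt bs (l.drop (p.length+1)) hrlen
          have hbv : bitv (b != c) = 0 := by rw [hcb]; simp [bitv]  -- b != b
          rw [hbv]
          simp only [zero_mul, zero_add]
          omega
        · have hco : c = !b := by cases b <;> cases c <;> simp_all
          subst hco
          have hbv : bitv (b != !b) = 1 := by cases b <;> rfl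
          rw [hbv, one_mul]
          have hmem2 : xorBits bs (l.drop (p.length+1)) ∈ So := by
            rw [hSo]
            exact List.mem_map_of_mem ((mem_cands L _ l).mpr ⟨((mem_cands L p l).mp hlc).1, hcpre⟩)
          have := hmaxO _ hmem2
          omega
      -- and the bound is attained
      have hatt : 2^bs.length + Mx So ∈ S := by
        rw [hSo, List.mem_map] at hmemO
        obtain ⟨l1, hl1, hval⟩ := hmemO
        have hl1L := ((mem_cands L _ l1).mp hl1).1
        have hl1pre : (p ++ [!b]) <+: l1 := ((mem_cands L _ l1).mp hl1).2
        have hl1p : l1 ∈ cands L p :=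
          (mem_cands L p l1).mpr ⟨hl1L, (List.prefix_append p [!b]).trans hl1pre⟩
        obtain ⟨c, hcpre, hdec, huniq, hrlen⟩ := cand_split L p b bs hlen' l1 hl1p
        have hcb : c = !b := (huniq (!b) hl1pre).symm
        rw [hS, List.mem_map]
        refine ⟨l1, hl1p, ?_⟩
        have hbv : bitv (b != c) = 1 := by rw [hcb]; cases b <;> rfl
        rw [hdec, hbv, one_mul, hval]
      have hMx : Mx S = 2^bs.length + Mx So :=
        le_antisymm (hub _ hmemS) (hmaxS _ hatt)
      rw [hMx]
      simp only [pow_succ]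
      ring

-- --- per-query agreement ---

theorem mx_eq (t : TrieA) (P : List Int) (hP : P ≠ [])
    (hb : ∀ a ∈ P, 0 ≤ a ∧ a < 1048576)
    (hI : TInv t P)
    (v : Int) (hv0 : 0 ≤ v) (hv1 : v < 1048576) :
    mxA t (pyBits v) 0 = scanMax P v := by
  have hE' : ∀ s : List Bool, s ≠ [] → ((subA t s ≠ .nil) ↔ ∃ l ∈ P.map pyBits, s <+: l) := by
    intro s hs
    rw [(hI.2) s hs]
    simp [List.mem_map]
  have hlen : ∀ l ∈ P.map pyBits, l.length = ([] : List Bool).length + (pyBits v).length := by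
    intro l hl
    rw [List.mem_map] at hl
    obtain ⟨a, ha, rfl⟩ := hl
    rw [pyBits_len a (hb a ha).1 (hb a ha).2, pyBits_len v hv0 hv1]
    rfl
  have hex : ∃ l ∈ P.map pyBits, ([] : List Bool) <+: l := by
    cases P with
    | nil => exact absurd rfl hP
    | cons a as => exact ⟨pyBits a, by simp, List.nil_prefix⟩
  have hg := greedy t (P.map pyBits) hE' (pyBits v) [] 0 hlen hex
  have hsub : subA t [] = t := rfl
  rw [hsub] at hg
  rw [hg]
  have hcnil : cands (P.map pyBits) [] = P.map pyBits := by
    unfold cands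
    apply List.filter_eq_self.mpr
    intro l _
    rw [List.isPrefixOf_iff_prefix]
    exact List.nil_prefix
  rw [hcnil, List.map_map]
  have hmc : (P.map ((fun l => xorBits (pyBits v) (l.drop ([] : List Bool).length)) ∘ pyBits))
      = P.map (fun a => PySem.Int.bxor v a) := by
    apply List.map_congr_left
    intro a ha
    simp only [Function.comp]
    rw [List.length_nil, List.drop_zero, xorBits_eq_bxor v a hv0 hv1 (hb a ha).1 (hb a ha).2]
  rw [hmc]
  unfold scanMax Mx
  simp

-- --- the DFSs agree ---

theorem dfs_sync (N : Int) (hN : N ≤ 1048576)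
    (nq : PySem.Dict Int (List (Int × Int))) (g : PySem.Dict Int (List Int))
    (hq : ∀ node v i, 0 ≤ node → node < N → (v, i) ∈ nq.getD node [] → 0 ≤ v ∧ v < 1048576)
    (hg : ∀ node c, c ∈ g.getD node [] → 0 ≤ c ∧ c < N) :
    ∀ (f : Nat) (node : Int) (P : List Int) (t : TrieA) (res : List Int),
      TInv t (P ++ [node]) → (∀ a ∈ P ++ [node], 0 ≤ a ∧ a < N) →
      (dfsA nq g f node t res).1 = t ∧
      (dfsA nq g f node t res).2 = dfsB nq g f node P res := by
  intro f
  induction f with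
  | zero =>
    intro node P t res hI hbnd
    exact ⟨rfl, rfl⟩
  | succ f ihf =>
    intro node P t res hI hbnd
    simp only [dfsA, dfsB]
    have hb20 : ∀ a ∈ P ++ [node], 0 ≤ a ∧ a < 1048576 := by
      intro a ha
      exact ⟨(hbnd a ha).1, lt_of_lt_of_le (hbnd a ha).2 hN⟩
    have hnode := hbnd node (List.mem_append_right _ (List.mem_singleton_self node))
    have hres : (nq.getD node []).foldl (fun r vi => r.set vi.2.toNat (mxA t (pyBits vi.1) 0)) res
        = (nq.getD node []).foldl (fun r vi => r.set vi.2.toNat (scanMax (P ++ [node]) vi.1)) res := by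
      apply PySem.List.foldl_congr_mem
      intro acc vi hvi
      have hv := hq node vi.1 vi.2 hnode.1 hnode.2 (by simpa using hvi)
      rw [mx_eq t (P ++ [node]) (by simp) hb20 hI vi.1 hv.1 hv.2]
    rw [hres]
    have hfold : ∀ (cs : List Int), (∀ c ∈ cs, 0 ≤ c ∧ c < N) →
        ∀ r : List Int,
        (cs.foldl (fun acc c =>
            let ti := insA acc.1 (pyBits c)
            let td := dfsA nq g f c ti.1 acc.2
            match ti.2 with
            | some k => (remA td.1 (pyBits c) k, td.2)
            | none => td) (t, r)).1 = t ∧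
        (cs.foldl (fun acc c =>
            let ti := insA acc.1 (pyBits c)
            let td := dfsA nq g f c ti.1 acc.2
            match ti.2 with
            | some k => (remA td.1 (pyBits c) k, td.2)
            | none => td) (t, r)).2
          = cs.foldl (fun a c => dfsB nq g f c (P ++ [node]) a) r := by
      intro cs
      induction cs with
      | nil => intro _ r; exact ⟨rfl, rfl⟩
      | cons c cs ihc =>
        intro hcs r
        simp only [List.foldl_cons]
        have hc := hcs c List.mem_cons_self
        have hInv' : TInv (insA t (pyBits c)).1 ((P ++ [node]) ++ [c]) := by
          constructor
          · exact ins_ne_nil t _ hI.1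
          · intro s hs
            rw [ins_sub _ _ _ hI.1, hI.2 s hs]
            constructor
            · rintro (⟨a, ha, hpre⟩ | hpre)
              · exact ⟨a, List.mem_append_left _ ha, hpre⟩
              · exact ⟨c, List.mem_append_right _ (List.mem_singleton_self c), hpre⟩
            · rintro ⟨a, ha, hpre⟩
              rcases List.mem_append.mp ha with h | h
              · exact Or.inl ⟨a, h, hpre⟩
              · rw [List.mem_singleton] at h
                subst h
                exact Or.inr hpre
        have hbnd' : ∀ a ∈ (P ++ [node]) ++ [c], 0 ≤ a ∧ a < N := by
          intro a ha
          rcases List.mem_append.mp ha with h | h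
          · exact hbnd a h
          · rw [List.mem_singleton] at h; subst h; exact hc
        have hstep := ihf c (P ++ [node]) (insA t (pyBits c)).1 r hInv' hbnd'
        have hpair : (let ti := insA t (pyBits c)
            let td := dfsA nq g f c ti.1 r
            match ti.2 with
            | some k => (remA td.1 (pyBits c) k, td.2)
            | none => td)
            = (t, dfsB nq g f c (P ++ [node]) r) := by
          cases hk : (insA t (pyBits c)).2 with
          | none =>
            simp only [hk]
            have ht' := ins_idx_none _ _ hk
            refine Prod.ext ?_ hstep.2
            rw [hstep.1, ht']
          | some k =>
            simp only [hk]
            apply Prod.ext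
            · rw [hstep.1]
              exact rem_ins _ _ _ hk
            · exact hstep.2
        rw [hpair]
        exact ihc (fun x hx => hcs x (List.mem_cons_of_mem _ hx)) (dfsB nq g f c (P ++ [node]) r)
    exact ⟨(hfold _ (fun x hx => hg node x hx) _).1, (hfold _ (fun x hx => hg node x hx) _).2⟩

-- --- scaffolding equalities ---

theorem nq_eq (queries : List (List Int)) : nqA queries = byNodeB queries 0 PySem.Dict.empty := by
  have h : ∀ (l : List (List Int)) (i : Int) (d : PySem.Dict Int (List (Int × Int))),
      (PySem.List.enumerate l i).foldl
        (fun d p => d.insert (p.2.headD 0) (d.getD (p.2.headD 0) [] ++ [(p.2.getD 1 0, p.1)])) d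
      = byNodeB l i d := by
    intro l
    induction l with
    | nil => intro i d; simp [PySem.List.enumerate_nil, byNodeB]
    | cons q qs ih =>
      intro i d
      rw [PySem.List.enumerate_cons]
      simp only [List.foldl_cons, byNodeB]
      exact ih _ _
  exact (h queries 0 _)

theorem g_eq (parents : List Int) : (graphStartA parents).1 = childrenB parents 0 PySem.Dict.empty := by
  have h : ∀ (l : List Int) (i : Int) (d : PySem.Dict Int (List Int)) (s : Option Int),
      ((PySem.List.enumerate l i).foldl
        (fun acc p => ((acc.1.insert p.2 (acc.1.getD p.2 [] ++ [p.1])),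
          if p.2 = -1 then some p.1 else acc.2)) (d, s)).1
      = childrenB l i d := by
    intro l
    induction l with
    | nil => intro i d s; simp [PySem.List.enumerate_nil, childrenB]
    | cons p ps ih =>
      intro i d s
      rw [PySem.List.enumerate_cons]
      simp only [List.foldl_cons, childrenB]
      exact ih _ _ _
  exact h parents 0 _ _

theorem root_eq (parents : List Int) : (graphStartA parents).2 = rootB parents := by
  have h : ∀ (l : List Int) (i : Int) (d : PySem.Dict Int (List Int)) (s0 : Option Int),
      ((PySem.List.enumerate l i).foldl
        (fun acc p => ((acc.1.insert p.2 (acc.1.getD p.2 [] ++ [p.1])),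
          if p.2 = -1 then some p.1 else acc.2)) (d, s0)).2
      = (match (PySem.List.enumerate l i).reverse.find? (fun p => p.2 == -1) with
         | some x => some x.1
         | none => s0) := by
    intro l
    induction l with
    | nil => intro i d s0; simp [PySem.List.enumerate_nil]
    | cons p ps ih =>
      intro i d s0
      rw [PySem.List.enumerate_cons]
      simp only [List.foldl_cons, List.reverse_cons, List.find?_append]
      rw [ih]
      cases hf : (PySem.List.enumerate ps (i+1)).reverse.find? (fun q => q.2 == -1) with
      | some x => simp
      | none =>
        by_cases hp : p = -1
        · simp [List.find?, hp]
        · simp only [List.find?, if_neg hp]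
          rw [show (p == -1) = false from by simp [hp]]
          rfl
  unfold graphStartA rootB
  rw [h]
  cases (PySem.List.enumerate parents 0).reverse.find? (fun p => p.2 == -1) <;> simp

theorem nq_val_bound (N : Int) (queries : List (List Int))
    (hq : ∀ q ∈ queries, q.headD 0 < 0 ∨ N ≤ q.headD 0 ∨ (0 ≤ q.getD 1 0 ∧ q.getD 1 0 < 1048576)) :
    ∀ node v i, 0 ≤ node → node < N → (v, i) ∈ (nqA queries).getD node [] → 0 ≤ v ∧ v < 1048576 := by
  have h : ∀ (l : List (Int × List Int)) (d : PySem.Dict Int (List (Int × Int))),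
      (∀ node v i, 0 ≤ node → node < N → (v, i) ∈ d.getD node [] → 0 ≤ v ∧ v < 1048576) →
      (∀ p ∈ l, p.2.headD 0 < 0 ∨ N ≤ p.2.headD 0 ∨ (0 ≤ p.2.getD 1 0 ∧ p.2.getD 1 0 < 1048576)) →
      ∀ node v i, 0 ≤ node → node < N → (v, i) ∈ (l.foldl
        (fun d p => d.insert (p.2.headD 0) (d.getD (p.2.headD 0) [] ++ [(p.2.getD 1 0, p.1)])) d).getD node [] →
        0 ≤ v ∧ v < 1048576 := by
    intro l
    induction l with
    | nil => intro d hd _ node v i h0 h1 hm; exact hd node v i h0 h1 hm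
    | cons p ps ih =>
      intro d hd hl node v i h0 h1 hm
      refine ih _ ?_ (fun q hq2 => hl q (List.mem_cons_of_mem _ hq2)) node v i h0 h1 hm
      intro node' v' i' h0' h1' hm'
      rw [PySem.Dict.getD_insert] at hm'
      by_cases hn : node' = p.2.headD 0
      · rw [if_pos hn] at hm'
        rcases List.mem_append.mp hm' with hm2 | hm2
        · exact hd _ _ _ (hn ▸ h0') (hn ▸ h1') hm2
        · simp at hm2
          rcases hm2 with ⟨rfl, _⟩
          rcases hl p List.mem_cons_self with hcase | hcase | hcase
          · exact absurd (hn ▸ h0') (by omega)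
          · exact absurd (hn ▸ h1') (by omega)
          · exact hcase
      · rw [if_neg hn] at hm'
        exact hd _ _ _ h0' h1' hm'
  intro node v i h0 h1 hm
  refine h _ _ (by simp [PySem.Dict.getD_empty]) ?_ node v i h0 h1 hm
  intro p hp
  rw [PySem.List.mem_enumerate_iff] at hp
  obtain ⟨k, hk, rfl⟩ := hp
  exact hq _ (List.getElem_mem hk)

theorem g_bound (parents : List Int) :
    ∀ node c, c ∈ (graphStartA parents).1.getD node [] → 0 ≤ c ∧ c < (parents.length : Int) := by
  have h : ∀ (l : List (Int × Int)) (d : PySem.Dict Int (List Int)) (s : Option Int),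
      (∀ node c, c ∈ d.getD node [] → 0 ≤ c ∧ c < (parents.length : Int)) →
      (∀ p ∈ l, 0 ≤ p.1 ∧ p.1 < (parents.length : Int)) →
      ∀ node c, c ∈ ((l.foldl
        (fun acc p => ((acc.1.insert p.2 (acc.1.getD p.2 [] ++ [p.1])),
          if p.2 = -1 then some p.1 else acc.2)) (d, s)).1.getD node []) →
        0 ≤ c ∧ c < (parents.length : Int) := by
    intro l
    induction l with
    | nil => intro d s hd _ node c hm; exact hd node c hm
    | cons p ps ih =>
      intro d s hd hl node c hm
      refine ih _ _ ?_ (fun q hq2 => hl q (List.mem_cons_of_mem _ hq2)) node c hm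
      intro node' c' hm'
      rw [PySem.Dict.getD_insert] at hm'
      by_cases hn : node' = p.2
      · rw [if_pos hn] at hm'
        rcases List.mem_append.mp hm' with hm2 | hm2
        · exact hd _ _ hm2
        · simp at hm2
          subst hm2
          exact hl p List.mem_cons_self
      · rw [if_neg hn] at hm'
        exact hd _ _ hm'
  intro node c hm
  refine h _ _ _ (by simp [PySem.Dict.getD_empty]) ?_ node c hm
  intro p hp
  rw [PySem.List.mem_enumerate_iff] at hp
  obtain ⟨k, hk, rfl⟩ := hp
  constructor
  · simp
  · simp only [zero_add]
    exact_mod_cast hk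

theorem root_bound (parents : List Int) (r : Int) (h : rootB parents = some r) :
    0 ≤ r ∧ r < (parents.length : Int) := by
  unfold rootB at h
  cases hf : (PySem.List.enumerate parents 0).reverse.find? (fun p => p.2 == -1) with
  | none => rw [hf] at h; simp at h
  | some x =>
    rw [hf] at h
    simp only [Option.map_some, Option.some.injEq] at h
    subst h
    have hx := List.mem_reverse.mp (List.mem_of_find?_eq_some hf)
    rw [PySem.List.mem_enumerate_iff] at hx
    obtain ⟨k, hk, rfl⟩ := hx
    constructor
    · simp
    · simp only [zero_add]
      exact_mod_cast hk

theorem root_triv : TrieA.nd .nil .nil ≠ TrieA.nil := by simp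

theorem sub_root_nil (sl : List Bool) (hs1 : sl ≠ []) :
    subA (TrieA.nd .nil .nil) sl = .nil := by
  cases sl with
  | nil => exact absurd rfl hs1
  | cons b bs => cases b <;> simp [subA, TrieA.child, subA_nil]

-- ===== VERDICT (by name: the statement is the Claim_ definition above) =====
theorem maxGeneticDifference_spec : Claim_equal_maxGeneticDifference := by
  intro parents queries hdom hpre
  unfold Spec_maxGeneticDifference
  simp only [maxGeneticDifference, maxGeneticDifference_alt]
  rw [← nq_eq queries, ← g_eq parents, ← root_eq parents]
  cases hs : (graphStartA parents).2 with
  | none => rfl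
  | some r =>
    have hroot := root_bound parents r (by rw [← root_eq]; exact hs)
    have hN : (parents.length : Int) ≤ 1048576 := by exact_mod_cast hpre.2.1
    have hInv : TInv (insA (TrieA.nd .nil .nil) (pyBits r)).1 ([] ++ [r]) := by
      constructor
      · exact ins_ne_nil _ _ root_triv
      · intro sl hs1
        rw [ins_sub _ _ _ root_triv, sub_root_nil sl hs1]
        simp
    exact (dfs_sync (parents.length : Int) hN (nqA queries) (graphStartA parents).1
      (nq_val_bound (parents.length : Int) queries (fun q hq2 => (hpre.2.2 q hq2).2))
      (g_bound parents)
      (parents.length + 1) r [] _ (List.replicate queries.length (0:Int))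
      hInv (by intro a ha; simp at ha; subst ha; exact hroot)).2
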